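-- pv_equiv track=rewrite | github.com/serhatbekirtan/MyLeetCodeSolutions | Medium/1395-CountNumberofTeams/CountNumberofTeams.py | numTeamsLin
-- ===== SOURCE A (Python) =====
-- from typing import List
--
-- def numTeamsLin(rating: List[int]) -> int:
--     result = 0
--
--     for mid in range(1, len(rating) - 1):
--         smallerLeft, smallerRight, greaterLeft, greaterRight = 0, 0, 0, 0
--
--         for L in range(mid):
--             if rating[L] < rating[mid]:
--                 smallerLeft += 1
--             else:
--                 greaterLeft += 1
--
--         for R in range(mid + 1, len(rating)):
--             if rating[R] < rating[mid]:
--                 smallerRight += 1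
--             else:
--                 greaterRight += 1
--
--         result += (smallerLeft * greaterRight) + (greaterLeft * smallerRight)
--
--     return result
-- ===== SOURCE B (Python) =====
-- def numTeamsLin(rating):
--     n = len(rating)
--
--     def smaller_counts(seq):
--         # For each element, how many strictly smaller elements precede it,
--         # found by binary search in a sorted list of the elements seen so far.
--         counts = []
--         seen = []
--         for v in seq:
--             lo, hi = 0, len(seen)
--             while lo < hi:
--                 m = (lo + hi) // 2
--                 if seen[m] < v:
--                     lo = m + 1
--                 else:
--                     hi = m
--             counts.append(lo)
--             seen.insert(lo, v)
--         return counts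
--
--     sL = smaller_counts(rating)
--     sR = smaller_counts(reversed(rating))
--     sR.reverse()
--
--     total = 0
--     for j in range(1, n - 1):
--         total += sL[j] * (n - 1 - j - sR[j]) + (j - sL[j]) * sR[j]
--     return total
-- ===== Notes on version B (the rewrite author's own statement) =====
-- stated objective: faster
-- what changed: Instead of A's per-middle rescans of both sides, B makes two sweeps that maintain a sorted list of seen elements and binary-search each element's strictly-smaller-predecessor count, then combines counts in one linear pass.
import Mathlib
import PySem

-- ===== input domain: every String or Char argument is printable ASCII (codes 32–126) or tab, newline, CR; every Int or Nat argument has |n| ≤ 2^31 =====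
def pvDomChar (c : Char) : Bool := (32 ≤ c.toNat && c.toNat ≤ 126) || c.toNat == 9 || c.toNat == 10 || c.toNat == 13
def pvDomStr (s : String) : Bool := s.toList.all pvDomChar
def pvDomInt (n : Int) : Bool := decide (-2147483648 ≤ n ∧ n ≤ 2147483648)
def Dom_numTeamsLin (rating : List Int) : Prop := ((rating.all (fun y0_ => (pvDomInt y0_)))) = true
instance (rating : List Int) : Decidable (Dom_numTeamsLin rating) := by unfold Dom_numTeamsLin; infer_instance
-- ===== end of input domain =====

-- B replaces A's per-middle rescans of both sides by two sweeps that keep a sorted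
-- list of the elements seen so far and binary-search each element's strictly-smaller
-- count, then one linear combine pass (measured much faster in Python).

-- ===== PORT A =====
def numTeamsLin (rating : List Int) : Int :=
  (PySem.List.pyRange 1 ((rating.length : Int) - 1) 1).foldl (fun result mid =>
    let left := (PySem.List.pyRange 0 mid 1).foldl
      (fun (st : Int × Int) L =>
        if PySem.List.pyGetD rating L 0 < PySem.List.pyGetD rating mid 0
        then (st.1 + 1, st.2) else (st.1, st.2 + 1)) (0, 0)
    let right := (PySem.List.pyRange (mid + 1) (rating.length : Int) 1).foldl
      (fun (st : Int × Int) R =>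
        if PySem.List.pyGetD rating R 0 < PySem.List.pyGetD rating mid 0
        then (st.1 + 1, st.2) else (st.1, st.2 + 1)) (0, 0)
    result + (left.1 * right.2 + left.2 * right.1)) 0

-- ===== PORT B =====
-- the inner 'while lo < hi' binary search of Source B (seen[m] is always in range there)
def bisectLo (seen : List Int) (v : Int) (lo hi : Nat) : Nat :=
  if _h : lo < hi then
    let m := (lo + hi) / 2
    if seen.getD m 0 < v then bisectLo seen v (m + 1) hi else bisectLo seen v lo m
  else lo
termination_by hi - lo
decreasing_by all_goals omega

-- Source B's smaller_counts: sorted 'seen' list + binary search + positional insert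
def smallerCounts (seq : List Int) : List Int :=
  (seq.foldl (fun (st : List Int × List Int) v =>
      let lo := bisectLo st.1 v 0 st.1.length
      (PySem.List.insert st.1 (lo : Int) v, st.2 ++ [(lo : Int)])) ([], [])).2

def numTeamsLin_alt (rating : List Int) : Int :=
  let n : Int := rating.length
  let sL := smallerCounts rating
  let sR := (smallerCounts rating.reverse).reverse
  (PySem.List.pyRange 1 (n - 1) 1).foldl (fun total j =>
      total + (PySem.List.pyGetD sL j 0 * (n - 1 - j - PySem.List.pyGetD sR j 0)
             + (j - PySem.List.pyGetD sL j 0) * PySem.List.pyGetD sR j 0)) 0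

-- ===== PRECONDITION & SPEC =====
def Spec_numTeamsLin (rating : List Int) (out : Int) : Prop := out = numTeamsLin_alt rating
instance (rating : List Int) (out : Int) : Decidable (Spec_numTeamsLin rating out) := by unfold Spec_numTeamsLin; infer_instance

-- ===== CLAIM (what is proved, stated in full; the proofs are below) =====
def Claim_equal_numTeamsLin : Prop := ∀ (rating : List Int), Dom_numTeamsLin rating → Spec_numTeamsLin rating (numTeamsLin rating)

-- ===== LEMMAS AND PROOFS =====

/-- A fold over `range(a, a+k)` reading `xs[j]` is a fold over the corresponding segment. -/
theorem foldl_pyRange_pyGetD_seg_aux {β : Type} (xs : List β) (d : β) {γ : Type}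
    (f : γ → β → γ) (k : Nat) :
    ∀ (a : Int) (init : γ), 0 ≤ a → a + k ≤ (xs.length : Int) →
    (PySem.List.pyRange a (a + k) 1).foldl
        (fun acc j => f acc (PySem.List.pyGetD xs j d)) init
      = ((xs.drop a.toNat).take k).foldl f init := by
  induction k with
  | zero =>
    intro a init _ _
    simp [PySem.List.pyRange_one_eq_nil (le_refl a)]
  | succ k ih =>
    intro a init ha hb
    have hlt : a < a + (k + 1 : Nat) := by push_cast; omega
    rw [PySem.List.pyRange_one_cons hlt]
    have haln : a.toNat < xs.length := by omega
    have hdrop : xs.drop a.toNat = xs[a.toNat] :: xs.drop (a.toNat + 1) :=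
      List.drop_eq_getElem_cons haln
    have hget : PySem.List.pyGetD xs a d = xs[a.toNat] :=
      PySem.List.pyGetD_eq_getElem xs d ha (by omega)
    have hrange : a + (k + 1 : Nat) = (a + 1) + (k : Nat) := by push_cast; omega
    rw [hdrop, List.take_succ_cons, List.foldl_cons, List.foldl_cons, hget, hrange]
    have := ih (a + 1) (f init xs[a.toNat]) (by omega) (by omega)
    rw [this]
    have : (a + 1).toNat = a.toNat + 1 := by omega
    rw [this]

theorem foldl_pyRange_pyGetD_seg {β : Type} (xs : List β) (d : β) {γ : Type}
    (f : γ → β → γ) (a b : Int) (init : γ) (ha : 0 ≤ a) (hb : b ≤ (xs.length : Int)) :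
    (PySem.List.pyRange a b 1).foldl
        (fun acc j => f acc (PySem.List.pyGetD xs j d)) init
      = ((xs.drop a.toNat).take (b - a).toNat).foldl f init := by
  by_cases h : b ≤ a
  · rw [PySem.List.pyRange_one_eq_nil h]
    have : (b - a).toNat = 0 := by omega
    simp [this]
  · have hb' : b = a + ((b - a).toNat : Nat) := by omega
    rw [hb']
    have : ((a + ((b - a).toNat : Nat)) - a) = ((b - a).toNat : Int) := by omega
    rw [this, Int.toNat_natCast]
    exact foldl_pyRange_pyGetD_seg_aux xs d f (b - a).toNat a init ha (by omega)

/-- A's two-counter classification fold computes the `<`-count and its complement. -/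
theorem classify_foldl (m : Int) (l : List Int) :
    ∀ s g : Int,
    l.foldl (fun (st : Int × Int) v =>
        if v < m then (st.1 + 1, st.2) else (st.1, st.2 + 1)) (s, g)
      = (s + (l.countP (fun x => decide (x < m)) : Int),
         g + ((l.length : Int) - (l.countP (fun x => decide (x < m)) : Int))) := by
  induction l with
  | nil => intro s g; simp
  | cons v t ih =>
    intro s g
    by_cases h : v < m
    · rw [List.foldl_cons, if_pos h, ih]
      simp [h, Prod.ext_iff]
      omega
    · rw [List.foldl_cons, if_neg h, ih]
      simp [h, Prod.ext_iff]
      omega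

/-- In a sorted list the elements `< v` are exactly the first `countP (· < v)` ones. -/
theorem sorted_countP_char (v : Int) (l : List Int) (h : l.Pairwise (· ≤ ·)) :
    (∀ x ∈ l.take (l.countP (fun x => decide (x < v))), x < v) ∧
    (∀ x ∈ l.drop (l.countP (fun x => decide (x < v))), ¬ x < v) := by
  induction l with
  | nil => simp
  | cons a t ih =>
    have hat : ∀ x ∈ t, a ≤ x := (List.pairwise_cons.1 h).1
    have ht : t.Pairwise (· ≤ ·) := (List.pairwise_cons.1 h).2
    by_cases hav : a < v
    · have hc : (a :: t).countP (fun x => decide (x < v))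
          = t.countP (fun x => decide (x < v)) + 1 := by
        simp [hav]
      rw [hc]
      obtain ⟨ih1, ih2⟩ := ih ht
      refine ⟨?_, ?_⟩
      · intro x hx
        rw [List.take_succ_cons] at hx
        rcases List.mem_cons.1 hx with rfl | hx
        · exact hav
        · exact ih1 x hx
      · intro x hx
        rw [List.drop_succ_cons] at hx
        exact ih2 x hx
    · have hc : (a :: t).countP (fun x => decide (x < v)) = 0 := by
        rw [List.countP_eq_zero]
        intro x hx
        simp only [decide_eq_true_eq]
        rcases List.mem_cons.1 hx with rfl | hx
        · exact hav
        · intro hlt; exact hav (lt_of_le_of_lt (hat x hx) hlt)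
      rw [hc]
      refine ⟨by simp, ?_⟩
      intro x hx
      simp only [List.drop_zero] at hx
      rcases List.mem_cons.1 hx with rfl | hx
      · exact hav
      · intro hlt; exact hav (lt_of_le_of_lt (hat x hx) hlt)

/-- Index form: in a sorted list, `l[i] < v ↔ i < countP (· < v)`. -/
theorem sorted_getD_lt_iff (v : Int) (l : List Int) (h : l.Pairwise (· ≤ ·))
    (i : Nat) (hi : i < l.length) :
    (l.getD i 0 < v ↔ i < l.countP (fun x => decide (x < v))) := by
  obtain ⟨h1, h2⟩ := sorted_countP_char v l h
  have hcle : l.countP (fun x => decide (x < v)) ≤ l.length := List.countP_le_length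
  have hget : l.getD i 0 = l[i] := List.getD_eq_getElem l 0 hi
  constructor
  · intro hlt
    by_contra hge
    have hge' : l.countP (fun x => decide (x < v)) ≤ i := by omega
    have : l[i] ∈ l.drop (l.countP (fun x => decide (x < v))) := by
      have : l[i] = (l.drop (l.countP (fun x => decide (x < v))))[i - l.countP (fun x => decide (x < v))]'(by
          simp [List.length_drop]; omega) := by
        rw [List.getElem_drop]
        congr 1
        omega
      rw [this]
      exact List.getElem_mem _
    exact h2 _ this (hget ▸ hlt)
  · intro hlt
    have : l[i] ∈ l.take (l.countP (fun x => decide (x < v))) := by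
      have : l[i] = (l.take (l.countP (fun x => decide (x < v))))[i]'(by
          simp [List.length_take]; omega) := by
        rw [List.getElem_take]
      rw [this]
      exact List.getElem_mem _
    rw [hget]
    exact h1 _ this

/-- The binary search lands on `countP (· < v)` whenever it brackets it. -/
theorem bisectLo_eq (l : List Int) (v : Int) (h : l.Pairwise (· ≤ ·)) :
    ∀ (k lo hi : Nat), hi - lo ≤ k → hi ≤ l.length →
    lo ≤ l.countP (fun x => decide (x < v)) → l.countP (fun x => decide (x < v)) ≤ hi →
    bisectLo l v lo hi = l.countP (fun x => decide (x < v)) := by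
  intro k
  induction k with
  | zero =>
    intro lo hi hk _ h1 h2
    rw [bisectLo]
    have : ¬ lo < hi := by omega
    rw [dif_neg this]
    omega
  | succ k ih =>
    intro lo hi hk hlen h1 h2
    rw [bisectLo]
    by_cases hlh : lo < hi
    · rw [dif_pos hlh]
      have hm1 : lo ≤ (lo + hi) / 2 := by omega
      have hm2 : (lo + hi) / 2 < hi := by omega
      have hmlt : (lo + hi) / 2 < l.length := by omega
      have := sorted_getD_lt_iff v l h ((lo + hi) / 2) hmlt
      by_cases hc : l.getD ((lo + hi) / 2) 0 < v
      · rw [if_pos hc]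
        exact ih ((lo + hi) / 2 + 1) hi (by omega) hlen (by omega) h2
      · rw [if_neg hc]
        have : ¬ ((lo + hi) / 2 < l.countP (fun x => decide (x < v))) := fun hh => hc (this.2 hh)
        exact ih lo ((lo + hi) / 2) (by omega) (by omega) h1 (by omega)
    · rw [dif_neg hlh]
      omega

/-- Inserting `v` at position `countP (· < v)` of a sorted list keeps it sorted
    and just adds `v` to its contents. -/
theorem insert_countP_sorted (l : List Int) (v : Int) (h : l.Pairwise (· ≤ ·)) :
    (PySem.List.insert l ((l.countP (fun x => decide (x < v)) : Nat) : Int) v).Pairwise (· ≤ ·) ∧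
    (PySem.List.insert l ((l.countP (fun x => decide (x < v)) : Nat) : Int) v).Perm (v :: l) := by
  set c := l.countP (fun x => decide (x < v)) with hc
  have hcle : c ≤ l.length := List.countP_le_length
  rw [PySem.List.insert_natCast l c v hcle]
  obtain ⟨h1, h2⟩ := sorted_countP_char v l h
  constructor
  · rw [List.pairwise_append]
    refine ⟨h.take, ?_, ?_⟩
    · rw [List.pairwise_cons]
      refine ⟨fun x hx => le_of_not_gt fun hlt => h2 x hx hlt, h.drop⟩
    · intro x hx y hy
      have hxv : x < v := h1 x hx
      rcases List.mem_cons.1 hy with rfl | hy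
      · exact le_of_lt hxv
      · exact le_of_lt (lt_of_lt_of_le hxv (le_of_not_gt fun hlt => h2 y hy hlt))
  · have hp := @List.perm_middle _ v (l.take c) (l.drop c)
    rwa [List.take_append_drop] at hp

/-- Reference value of each smaller-to-the-left count. -/
def sLC (p : List Int) : List Int :=
  (List.range p.length).map
    (fun j => ((p.take j).countP (fun x => decide (x < p.getD j 0)) : Int))

theorem sLC_append (p : List Int) (v : Int) :
    sLC (p ++ [v]) = sLC p ++ [(p.countP (fun x => decide (x < v)) : Int)] := by
  unfold sLC
  rw [List.length_append, List.length_singleton, List.range_succ, List.map_append]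
  congr 1
  · apply List.map_congr_left
    intro j hj
    have hj' : j < p.length := List.mem_range.1 hj
    have ht : (p ++ [v]).take j = p.take j := List.take_append_of_le_length (le_of_lt hj')
    have hg : (p ++ [v]).getD j 0 = p.getD j 0 := by
      unfold List.getD
      rw [List.getElem?_append_left hj']
    rw [ht, hg]
  · simp [List.getD]

/-- Invariant of Source B's sweep: `seen` is the sorted multiset of the prefix and
    `counts` holds the strictly-smaller-to-the-left counts. -/
theorem smallerCounts_inv (p : List Int) :
    (p.foldl (fun (st : List Int × List Int) v =>
        let lo := bisectLo st.1 v 0 st.1.length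
        (PySem.List.insert st.1 (lo : Int) v, st.2 ++ [(lo : Int)])) ([], [])).1.Pairwise (· ≤ ·) ∧
    (p.foldl (fun (st : List Int × List Int) v =>
        let lo := bisectLo st.1 v 0 st.1.length
        (PySem.List.insert st.1 (lo : Int) v, st.2 ++ [(lo : Int)])) ([], [])).1.Perm p ∧
    (p.foldl (fun (st : List Int × List Int) v =>
        let lo := bisectLo st.1 v 0 st.1.length
        (PySem.List.insert st.1 (lo : Int) v, st.2 ++ [(lo : Int)])) ([], [])).2 = sLC p := by
  induction p using List.reverseRecOn with
  | nil => simp [sLC]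
  | append_singleton p v ih =>
    obtain ⟨hs, hp, hc⟩ := ih
    rw [List.foldl_append, List.foldl_cons, List.foldl_nil]
    set st := (p.foldl (fun (st : List Int × List Int) v =>
        let lo := bisectLo st.1 v 0 st.1.length
        (PySem.List.insert st.1 (lo : Int) v, st.2 ++ [(lo : Int)])) ([], [])) with hst
    have hbi : bisectLo st.1 v 0 st.1.length = st.1.countP (fun x => decide (x < v)) :=
      bisectLo_eq st.1 v hs st.1.length 0 st.1.length (by omega) (le_refl _)
        (Nat.zero_le _) List.countP_le_length
    have hcnt : st.1.countP (fun x => decide (x < v)) = p.countP (fun x => decide (x < v)) :=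
      hp.countP_eq _
    obtain ⟨hs', hp'⟩ := insert_countP_sorted st.1 v hs
    simp only [hbi]
    refine ⟨hs', ?_, ?_⟩
    · exact hp'.trans ((hp.cons v).trans (List.perm_append_singleton v p).symm)
    · rw [hc, hcnt, sLC_append]

/-- `smallerCounts` equals the reference counts. -/
theorem smallerCounts_eq (p : List Int) : smallerCounts p = sLC p :=
  (smallerCounts_inv p).2.2

theorem sLC_getD (p : List Int) (j : Nat) (hj : j < p.length) :
    (sLC p).getD j 0 = ((p.take j).countP (fun x => decide (x < p.getD j 0)) : Int) := by
  unfold sLC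
  rw [List.getD_eq_getElem _ 0 (by simpa using hj), List.getElem_map, List.getElem_range]

theorem length_sLC (p : List Int) : (sLC p).length = p.length := by
  simp [sLC]

/-- The reversed-sweep counts read at `j` give the strictly-smaller count to the right. -/
theorem sR_getD (rating : List Int) (j : Nat) (hj : j < rating.length) :
    ((sLC rating.reverse).reverse.getD j 0)
      = ((rating.drop (j + 1)).countP
          (fun x => decide (x < rating.getD j 0)) : Int) := by
  have hlen : (sLC rating.reverse).length = rating.length := by
    rw [length_sLC, List.length_reverse]
  have hj' : j < (sLC rating.reverse).reverse.length := by
    rw [List.length_reverse, hlen]; exact hj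
  rw [List.getD_eq_getElem _ 0 hj', List.getElem_reverse]
  have hidx : (sLC rating.reverse).length - 1 - j < (sLC rating.reverse).length := by omega
  have hidx2 : rating.length - 1 - j < rating.reverse.length := by
    rw [List.length_reverse]; omega
  have : (sLC rating.reverse)[(sLC rating.reverse).length - 1 - j]
      = (sLC rating.reverse).getD ((sLC rating.reverse).length - 1 - j) 0 :=
    (List.getD_eq_getElem _ 0 hidx).symm
  rw [this, hlen, sLC_getD rating.reverse (rating.length - 1 - j) hidx2]
  have hg : rating.reverse.getD (rating.length - 1 - j) 0 = rating.getD j 0 := by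
    rw [List.getD_eq_getElem _ 0 hidx2, List.getD_eq_getElem _ 0 hj, List.getElem_reverse]
    congr 1
    omega
  have htk : rating.reverse.take (rating.length - 1 - j)
      = (rating.drop (j + 1)).reverse := by
    have he : rating.length - (rating.length - 1 - j) = j + 1 := by omega
    rw [List.take_reverse, he]
  rw [hg, htk, List.countP_reverse]

/-- Per-middle agreement of the two fold bodies. -/
theorem numTeamsLin_step_eq (rating : List Int) (mid : Int)
    (h1 : 1 ≤ mid) (h2 : mid < (rating.length : Int) - 1) :
    ∀ acc : Int,
    (fun result mid =>
      let left := (PySem.List.pyRange 0 mid 1).foldl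
        (fun (st : Int × Int) L =>
          if PySem.List.pyGetD rating L 0 < PySem.List.pyGetD rating mid 0
          then (st.1 + 1, st.2) else (st.1, st.2 + 1)) (0, 0)
      let right := (PySem.List.pyRange (mid + 1) (rating.length : Int) 1).foldl
        (fun (st : Int × Int) R =>
          if PySem.List.pyGetD rating R 0 < PySem.List.pyGetD rating mid 0
          then (st.1 + 1, st.2) else (st.1, st.2 + 1)) (0, 0)
      result + (left.1 * right.2 + left.2 * right.1)) acc mid
    = (fun total j =>
        total + (PySem.List.pyGetD (smallerCounts rating) j 0
                  * ((rating.length : Int) - 1 - j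
                      - PySem.List.pyGetD ((smallerCounts rating.reverse).reverse) j 0)
               + (j - PySem.List.pyGetD (smallerCounts rating) j 0)
                  * PySem.List.pyGetD ((smallerCounts rating.reverse).reverse) j 0)) acc mid := by
  intro acc
  simp only []
  set m := PySem.List.pyGetD rating mid 0 with hm
  -- A's two scans, as counts over the prefix and the suffix
  rw [foldl_pyRange_pyGetD_seg rating 0
      (fun (st : Int × Int) v => if v < m then (st.1 + 1, st.2) else (st.1, st.2 + 1))
      0 mid (0, 0) (le_refl 0) (by omega)]
  rw [foldl_pyRange_pyGetD_seg rating 0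
      (fun (st : Int × Int) v => if v < m then (st.1 + 1, st.2) else (st.1, st.2 + 1))
      (mid + 1) (rating.length : Int) (0, 0) (by omega) (by omega)]
  rw [classify_foldl, classify_foldl]
  -- B's table reads, as the same counts
  have hmidn : mid.toNat < rating.length := by omega
  have hmd : m = rating.getD mid.toNat 0 := by
    rw [hm, PySem.List.pyGetD_eq_getElem rating 0 (by omega) (by omega),
        List.getD_eq_getElem rating 0 hmidn]
  have hL : PySem.List.pyGetD (smallerCounts rating) mid 0
      = ((rating.take mid.toNat).countP (fun x => decide (x < m)) : Int) := by
    rw [smallerCounts_eq]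
    have hlen : mid.toNat < (sLC rating).length := by rw [length_sLC]; omega
    rw [PySem.List.pyGetD_eq_getElem _ 0 (by omega) (by rw [length_sLC]; omega),
        ← List.getD_eq_getElem _ 0 hlen, sLC_getD rating mid.toNat hmidn, hmd]
  have hR : PySem.List.pyGetD ((smallerCounts rating.reverse).reverse) mid 0
      = ((rating.drop (mid.toNat + 1)).countP (fun x => decide (x < m)) : Int) := by
    rw [smallerCounts_eq]
    have hlen : mid.toNat < (sLC rating.reverse).reverse.length := by
      rw [List.length_reverse, length_sLC, List.length_reverse]; omega
    rw [PySem.List.pyGetD_eq_getElem _ 0 (by omega) (by omega),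
        ← List.getD_eq_getElem _ 0 hlen, sR_getD rating mid.toNat hmidn, hmd]
  rw [hL, hR]
  have hdrop0 : List.drop (Int.toNat 0) rating = rating := by simp
  rw [hdrop0]
  simp only [sub_zero]
  have htoNat : ((rating.length : Int) - (mid + 1)).toNat
      = (rating.drop ((mid + 1)).toNat).length := by
    simp; omega
  rw [htoNat, List.take_length]
  have hdropidx : ((mid + 1)).toNat = mid.toNat + 1 := by omega
  rw [hdropidx]
  set cL := ((rating.take mid.toNat).countP (fun x => decide (x < m)) : Int)
  set cR := ((rating.drop (mid.toNat + 1)).countP (fun x => decide (x < m)) : Int)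
  have hlt : ((rating.take mid.toNat).length : Int) = mid := by simp; omega
  have hld : ((rating.drop (mid.toNat + 1)).length : Int) = (rating.length : Int) - 1 - mid := by
    simp; omega
  simp only [zero_add, hlt, hld]

-- ===== VERDICT (by name: the statement is the Claim_ definition above) =====
theorem numTeamsLin_spec : Claim_equal_numTeamsLin := by
  intro rating _
  unfold Spec_numTeamsLin numTeamsLin numTeamsLin_alt
  simp only []
  apply PySem.List.foldl_congr_mem
  intro acc mid hmid
  have := (PySem.List.mem_pyRange_one).1 hmid
  exact numTeamsLin_step_eq rating mid this.1 this.2 acc
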